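-- pv_equiv track=rewrite | github.com/philiplamscript/bloodXXXrecorder | Function.py | vote2dict
-- ===== SOURCE A (Python) =====
-- def vote2dict(votes_str):
--     record_dict = {}
--     votes_str = f"&{votes_str}&" # for easy handling
--     str_len = len(votes_str)
--     for i in range(1,str_len):
--         target_str = votes_str[i]
--         if (target_str != "&"):
--             if (target_str == votes_str[i+1]) & (target_str == votes_str[i-1]): # this case record both
--                 record_dict[f"1{target_str}"] =True
--                 record_dict[f"{target_str}"] =True
--
--             if (target_str != votes_str[i+1]):# check next num. is not same, then record
--                 if target_str == votes_str[i-1]: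
--                     record_dict[f"1{target_str}"] =True
--                 else:
--                     record_dict[f"{target_str}"] =True
--
--             # check pervious number, see is +10
--     return record_dict
-- ===== SOURCE B (Python) =====
-- def vote2dict(votes_str):
--     # scan maximal runs of equal characters instead of comparing each position with its neighbours
--     s = f"{votes_str}"
--     record_dict = {}
--     i = 0
--     n = len(s)
--     while i < n:
--         c = s[i]
--         j = i + 1
--         while j < n and s[j] == c:
--             j += 1
--         if c != '&':
--             run = j - i
--             if run >= 2:
--                 record_dict['1' + c] = True
--             if run != 2:
--                 record_dict[c] = True
--         i = j
--     return record_dict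
-- ===== Notes on version B (the rewrite author's own statement) =====
-- stated objective: simpler
-- what changed: A wraps the string in sentinels and classifies every position by comparing it with both neighbours over an index loop; B scans maximal runs of equal characters once and maps each run length directly to the emitted keys (1 -> c, 2 -> '1'+c, >=3 -> both), with no sentinel wrapping and no per-position neighbour comparisons.
import Mathlib
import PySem

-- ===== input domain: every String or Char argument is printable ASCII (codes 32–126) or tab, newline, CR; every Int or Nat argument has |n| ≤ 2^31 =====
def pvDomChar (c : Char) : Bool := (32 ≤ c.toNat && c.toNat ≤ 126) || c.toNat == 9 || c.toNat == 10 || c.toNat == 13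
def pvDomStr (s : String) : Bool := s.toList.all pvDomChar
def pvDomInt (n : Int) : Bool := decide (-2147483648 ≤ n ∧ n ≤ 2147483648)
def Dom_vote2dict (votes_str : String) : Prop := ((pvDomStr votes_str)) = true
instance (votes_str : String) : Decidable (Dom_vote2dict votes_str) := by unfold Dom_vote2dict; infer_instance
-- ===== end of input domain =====

-- B replaces A's sentinel-wrapped neighbour-comparison index loop by a single scan over maximal
-- runs of equal characters (run length 1 -> key c, 2 -> key '1c', >=3 -> both); objective: simpler.

-- ===== PORT A =====
def vote2dict (votes_str : String) : List (String × Bool) :=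
  let s := "&" ++ votes_str ++ "&"          -- votes_str = f"&{votes_str}&"
  let strLen := PySem.Str.len s
  let d := (PySem.List.pyRange 1 strLen 1).foldl
    (fun d i =>
      match PySem.Str.pyGet? s i with
      | none => d                           -- unreachable: i ∈ range(1, str_len)
      | some t =>
        if t ≠ '&' then
          match PySem.Str.pyGet? s (i + 1), PySem.Str.pyGet? s (i - 1) with
          | some nxt, some prv =>
            let d := if t = nxt ∧ t = prv then
                (d.insert (String.ofList ['1', t]) true).insert (String.ofList [t]) true
              else d
            if t ≠ nxt then
              (if t = prv then d.insert (String.ofList ['1', t]) true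
               else d.insert (String.ofList [t]) true)
            else d
          | _, _ => d                       -- unreachable: 1 ≤ i < str_len and s[i] ≠ '&' forces i+1 < str_len
        else d)
    PySem.Dict.empty
  d.items

-- ===== PORT B =====
def vote2dictAltGo : List Char → PySem.Dict String Bool → PySem.Dict String Bool
  | [], d => d
  | c :: rest, d =>
    -- inner while loop: advance j to the end of the maximal run of c
    let run : Nat := 1 + (rest.takeWhile (fun x => x = c)).length
    let rest' := rest.dropWhile (fun x => x = c)
    let d :=
      if c ≠ '&' then
        let d := if 2 ≤ run then d.insert (String.ofList ['1', c]) true else d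
        if run ≠ 2 then d.insert (String.ofList [c]) true else d
      else d
    vote2dictAltGo rest' d
termination_by cs => cs.length
decreasing_by
  have h := List.length_dropWhile_le (fun x => decide (x = c)) rest
  simp only [List.length_cons]; omega

def vote2dict_alt (votes_str : String) : List (String × Bool) :=
  (vote2dictAltGo votes_str.toList PySem.Dict.empty).items

-- ===== PRECONDITION & SPEC =====
def Spec_vote2dict (votes_str : String) (out : List (String × Bool)) : Prop := out = vote2dict_alt votes_str
instance (votes_str : String) (out : List (String × Bool)) : Decidable (Spec_vote2dict votes_str out) := by unfold Spec_vote2dict; infer_instance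

-- ===== CLAIM (what is proved, stated in full; the proofs are below) =====
def Claim_equal_vote2dict : Prop := ∀ (votes_str : String), Dom_vote2dict votes_str → Spec_vote2dict votes_str (vote2dict votes_str)

-- ===== LEMMAS AND PROOFS =====

-- proof-side reformulation of A's per-index body as a three-character step
def stepA (prev t nxt : Char) (d : PySem.Dict String Bool) : PySem.Dict String Bool :=
  if t ≠ '&' then
    let d := if t = nxt ∧ t = prev then
        (d.insert (String.ofList ['1', t]) true).insert (String.ofList [t]) true
      else d
    if t ≠ nxt then
      (if t = prev then d.insert (String.ofList ['1', t]) true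
       else d.insert (String.ofList [t]) true)
    else d
  else d
def scanA (prev : Char) : List Char → PySem.Dict String Bool → PySem.Dict String Bool
  | [], d => d
  | [_], d => d
  | c :: c2 :: rest, d => scanA c (c2 :: rest) (stepA prev c c2 d)
theorem key1_ne_key (c : Char) : String.ofList ['1', c] ≠ String.ofList [c] := by
  intro h; have := congrArg String.toList h; simp at this
theorem insert_eq_self {d : PySem.Dict String Bool} {k : String} {v : Bool}
    (hnd : d.keys.Nodup) (hm : d.get? k = some v) : d.insert k v = d := by
  have hc : d.contains k = true := by rw [PySem.Dict.contains_eq_isSome_get?, hm]; rfl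
  apply PySem.Dict.ext
  rw [PySem.Dict.items_insert_of_contains d v hc]
  conv_rhs => rw [← List.map_id d.items]
  apply List.map_congr_left
  intro p hp
  by_cases hpk : p.1 = k
  · have : (k, p.2) ∈ d.items := by rw [← hpk]; exact hp
    have h2 := PySem.Dict.get?_of_mem_items d this hnd
    rw [hm] at h2
    obtain ⟨p1, p2⟩ := p; cases Option.some_inj.mp h2; simp at hpk; simp [hpk]
  · simp [hpk]


theorem run_scan (c : Char) (hc : c ≠ '&') :
    ∀ (m : Nat) (rest : List Char) (d : PySem.Dict String Bool),
      (∀ x, rest.head? = some x → x ≠ c) → d.keys.Nodup →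
      scanA c (List.replicate (m + 1) c ++ rest ++ ['&']) d =
      scanA c (rest ++ ['&'])
        (if m = 0 then d.insert (String.ofList ['1', c]) true
         else (d.insert (String.ofList ['1', c]) true).insert (String.ofList [c]) true) := by
  intro m
  induction m with
  | zero =>
    intro rest d hrest hnd
    obtain ⟨x, xs, hxx⟩ : ∃ x xs, rest ++ ['&'] = x :: xs := by
      cases rest with
      | nil => exact ⟨'&', [], rfl⟩
      | cons a as => exact ⟨a, as ++ ['&'], rfl⟩
    have hxc : x ≠ c := by
      cases rest with
      | nil =>
        simp only [List.nil_append, List.cons.injEq] at hxx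
        intro h; exact hc (hxx.1 ▸ h ▸ rfl)
      | cons a as =>
        simp only [List.cons_append, List.cons.injEq] at hxx
        exact hxx.1 ▸ hrest a rfl
    have h1 : List.replicate (0 + 1) c ++ rest ++ ['&'] = c :: (x :: xs) := by
      simp [List.replicate, hxx]
    rw [h1, hxx]
    show scanA c (x :: xs) (stepA c c x d) = scanA c (x :: xs) _
    congr 1
    simp [stepA, hc, Ne.symm hxc]
  | succ m ih =>
    intro rest d hrest hnd
    have h1 : List.replicate (m + 1 + 1) c ++ rest ++ ['&']
        = c :: c :: (List.replicate m c ++ rest ++ ['&']) := by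
      simp [List.replicate_succ]
    rw [h1]
    show scanA c (c :: (List.replicate m c ++ rest ++ ['&'])) (stepA c c c d) = _
    have h2 : stepA c c c d
        = (d.insert (String.ofList ['1', c]) true).insert (String.ofList [c]) true := by
      simp [stepA, hc]
    rw [h2]
    have h3 : c :: (List.replicate m c ++ rest ++ ['&'])
        = List.replicate (m + 1) c ++ rest ++ ['&'] := by
      simp [List.replicate_succ]
    rw [h3]
    set D1 := (d.insert (String.ofList ['1', c]) true).insert (String.ofList [c]) true with hD1
    have hndD1 : D1.keys.Nodup := by
      exact PySem.Dict.nodup_keys_insert _ _ _ (PySem.Dict.nodup_keys_insert _ _ _ hnd)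
    rw [ih rest D1 hrest hndD1]
    have hget1 : D1.get? (String.ofList ['1', c]) = some true := by
      rw [hD1, PySem.Dict.get?_insert_of_ne _ _ (key1_ne_key c), PySem.Dict.get?_insert_self]
    have e1 : D1.insert (String.ofList ['1', c]) true = D1 := insert_eq_self hndD1 hget1
    by_cases hm : m = 0
    · simp only [hm, if_neg (Nat.succ_ne_zero 0), e1, if_true]
    · have hget0 : D1.get? (String.ofList [c]) = some true := PySem.Dict.get?_insert_self _ _ _
      have e0 : D1.insert (String.ofList [c]) true = D1 := insert_eq_self hndD1 hget0
      simp only [if_neg hm, if_neg (Nat.succ_ne_zero m), e1, e0]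
theorem altGo_amp (cs : List Char) (d : PySem.Dict String Bool) :
    vote2dictAltGo ('&' :: cs) d = vote2dictAltGo cs d := by
  rw [vote2dictAltGo]
  simp only [ne_eq, not_true_eq_false, if_false]
  cases cs with
  | nil => simp
  | cons a as =>
    by_cases ha : a = '&'
    · subst ha
      rw [List.dropWhile_cons_of_pos (by simp)]
      conv_rhs => rw [vote2dictAltGo]
      simp
    · rw [List.dropWhile_cons_of_neg (by simp [ha])]

theorem takeWhile_rep (cs : List Char) (c : Char) :
    cs.takeWhile (fun x => x = c) = List.replicate (cs.takeWhile (fun x => x = c)).length c := by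
  apply List.eq_replicate_of_mem
  intro b hb
  have := List.mem_takeWhile_imp hb
  simpa using this

theorem head_dropWhile_ne (cs : List Char) (c : Char) (x : Char)
    (h : (cs.dropWhile (fun x => x = c)).head? = some x) : x ≠ c := by
  have := List.head?_dropWhile_not (fun x => decide (x = c)) cs
  rw [h] at this
  simpa using this

theorem scanA_eq_altGo :
    ∀ (n : Nat) (cs : List Char) (p : Char) (d : PySem.Dict String Bool),
      cs.length ≤ n → (∀ x, cs.head? = some x → x = '&' ∨ x ≠ p) → d.keys.Nodup →
      scanA p (cs ++ ['&']) d = vote2dictAltGo cs d := by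
  intro n
  induction n with
  | zero =>
    intro cs p d hlen _ _
    have : cs = [] := List.length_eq_zero_iff.mp (Nat.le_zero.mp hlen)
    subst this
    simp [scanA, vote2dictAltGo]
  | succ n ih =>
    intro cs p d hlen hhead hnd
    cases cs with
    | nil => simp [scanA, vote2dictAltGo]
    | cons c cs' =>
      by_cases hc : c = '&'
      · subst hc
        -- A side: step does nothing
        obtain ⟨x, xs, hxx⟩ : ∃ x xs, cs' ++ ['&'] = x :: xs := by
          cases cs' with
          | nil => exact ⟨'&', [], rfl⟩
          | cons a as => exact ⟨a, as ++ ['&'], rfl⟩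
        have hA : scanA p (('&' :: cs') ++ ['&']) d = scanA '&' (cs' ++ ['&']) d := by
          rw [List.cons_append, hxx]
          show scanA '&' (x :: xs) (stepA p '&' x d) = scanA '&' (x :: xs) d
          have : stepA p '&' x d = d := by simp [stepA]
          rw [this]
        rw [hA, ih cs' '&' d (by simpa using Nat.le_of_succ_le_succ hlen)
              (fun x _ => Classical.em _) hnd]
        exact (altGo_amp cs' d).symm
      · -- c ≠ '&': the whole run of c is handled by run_scan
        have hcp : c ≠ p := (hhead c rfl).resolve_left hc
        have hsplit : cs' = List.replicate (cs'.takeWhile (fun x => x = c)).length c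
            ++ cs'.dropWhile (fun x => x = c) := by
          conv_lhs => rw [← List.takeWhile_append_dropWhile (p := fun x => decide (x = c)) (l := cs')]
          rw [← takeWhile_rep]
        have hheadr : ∀ x, (cs'.dropWhile (fun x => x = c)).head? = some x → x ≠ c :=
          fun x hx => head_dropWhile_ne cs' c x hx
        have hlenr : (cs'.dropWhile (fun x => x = c)).length ≤ n := by
          have h1 := List.length_dropWhile_le (fun x => decide (x = c)) cs'
          simp only [List.length_cons] at hlen
          omega
        cases hK : (cs'.takeWhile (fun x => x = c)).length with
        | zero =>
          rw [hK] at hsplit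
          simp only [List.replicate, List.nil_append] at hsplit
          obtain ⟨x, xs, hxx⟩ : ∃ x xs, cs' ++ ['&'] = x :: xs := by
            cases cs' with
            | nil => exact ⟨'&', [], rfl⟩
            | cons a as => exact ⟨a, as ++ ['&'], rfl⟩
          have hxc : x ≠ c := by
            cases hcs0 : cs' with
            | nil =>
              rw [hcs0] at hxx
              simp only [List.nil_append, List.cons.injEq] at hxx
              intro h; exact hc (hxx.1 ▸ h ▸ rfl)
            | cons a as =>
              rw [hcs0] at hxx
              simp only [List.cons_append, List.cons.injEq] at hxx
              refine hxx.1 ▸ hheadr a ?_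
              rw [← hsplit, hcs0]; rfl
          have hA : scanA p ((c :: cs') ++ ['&']) d
              = scanA c (cs' ++ ['&']) (d.insert (String.ofList [c]) true) := by
            rw [List.cons_append, hxx]
            show scanA c (x :: xs) (stepA p c x d) = _
            have hst : stepA p c x d = d.insert (String.ofList [c]) true := by
              simp [stepA, hc, Ne.symm hxc, hcp]
            rw [hst]
          rw [hA, ih cs' c _ (by simp only [List.length_cons] at hlen; omega)
                (fun x hx => Or.inr (by rw [hsplit] at hx; exact hheadr x hx))
                (PySem.Dict.nodup_keys_insert _ _ _ hnd)]
          conv_rhs => rw [vote2dictAltGo]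
          rw [hK]
          norm_num
          rw [← hsplit, if_neg hc]
        | succ m =>
          rw [hK] at hsplit
          have hA1 : (c :: cs') ++ ['&']
              = c :: c :: (List.replicate m c ++ cs'.dropWhile (fun x => x = c) ++ ['&']) := by
            conv_lhs => rw [hsplit]
            simp [List.replicate_succ]
          have hstep : stepA p c c d = d := by
            simp [stepA, hcp]
          have hA : scanA p ((c :: cs') ++ ['&']) d
              = scanA c (List.replicate (m + 1) c ++ cs'.dropWhile (fun x => x = c) ++ ['&']) d := by
            rw [hA1]
            show scanA c (c :: (List.replicate m c ++ cs'.dropWhile (fun x => x = c) ++ ['&']))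
                (stepA p c c d) = _
            rw [hstep,
              show List.replicate (m + 1) c ++ cs'.dropWhile (fun x => x = c) ++ ['&']
                = c :: (List.replicate m c ++ cs'.dropWhile (fun x => x = c) ++ ['&']) from by
                  simp [List.replicate_succ]]
          have hndF : (if m = 0 then d.insert (String.ofList ['1', c]) true
              else (d.insert (String.ofList ['1', c]) true).insert (String.ofList [c]) true).keys.Nodup := by
            split_ifs
            · exact PySem.Dict.nodup_keys_insert _ _ _ hnd
            · exact PySem.Dict.nodup_keys_insert _ _ _ (PySem.Dict.nodup_keys_insert _ _ _ hnd)
          rw [hA, run_scan c hc m _ d hheadr hnd,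
              ih _ c _ hlenr (fun x hx => Or.inr (hheadr x hx)) hndF]
          conv_rhs => rw [vote2dictAltGo]
          rw [hK]
          cases m with
          | zero => norm_num [hc]
          | succ m' =>
            norm_num [hc]
            rw [if_neg (by omega), if_pos (by omega)]

theorem foldA (s : String) :
    ∀ (suf pre₀ : List Char) (p : Char) (d : PySem.Dict String Bool),
      s.toList = pre₀ ++ p :: suf →
      (PySem.List.pyRange ((pre₀.length : Int) + 1) ((s.toList.length : Nat) : Int) 1).foldl
        (fun d i =>
          match PySem.Str.pyGet? s i with
          | none => d
          | some t =>
            if t ≠ '&' then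
              match PySem.Str.pyGet? s (i + 1), PySem.Str.pyGet? s (i - 1) with
              | some nxt, some prv =>
                let d := if t = nxt ∧ t = prv then
                    (d.insert (String.ofList ['1', t]) true).insert (String.ofList [t]) true
                  else d
                if t ≠ nxt then
                  (if t = prv then d.insert (String.ofList ['1', t]) true
                   else d.insert (String.ofList [t]) true)
                else d
              | _, _ => d
            else d) d
      = scanA p suf d := by
  intro suf
  induction suf with
  | nil =>
    intro pre₀ p d hs
    rw [hs]
    rw [PySem.List.pyRange_one_eq_nil (by simp)]
    rfl
  | cons t suf' ih =>
    intro pre₀ p d hs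
    have hlen : s.toList.length = pre₀.length + 2 + suf'.length := by
      rw [hs]; simp; omega
    have hcons : PySem.List.pyRange ((pre₀.length : Int) + 1) ((s.toList.length : Nat) : Int) 1
        = ((pre₀.length : Int) + 1) :: PySem.List.pyRange ((pre₀.length : Int) + 1 + 1) ((s.toList.length : Nat) : Int) 1 := by
      rw [PySem.List.pyRange_one_cons (by rw [hlen]; push_cast; try omega)]
    rw [hcons, List.foldl_cons]
    -- evaluate the three lookups at index pre₀.length + 1
    have hget : PySem.Str.pyGet? s ((pre₀.length : Int) + 1) = some t := by
      rw [PySem.Str.pyGet?_eq, PySem.Chars.pyGet?_eq_listPyGet?, hs,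
        show pre₀ ++ p :: t :: suf' = (pre₀ ++ [p]) ++ t :: suf' by simp,
        show (pre₀.length : Int) + 1 = ((pre₀ ++ [p]).length : Int) by simp]
      exact PySem.List.pyGet?_append_length _ _ _
    have hprev : PySem.Str.pyGet? s ((pre₀.length : Int) + 1 - 1) = some p := by
      rw [PySem.Str.pyGet?_eq, PySem.Chars.pyGet?_eq_listPyGet?, hs,
        show (pre₀.length : Int) + 1 - 1 = (pre₀.length : Int) by ring]
      exact PySem.List.pyGet?_append_length _ _ _
    have hnext : PySem.Str.pyGet? s ((pre₀.length : Int) + 1 + 1) = suf'[0]? := by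
      rw [PySem.Str.pyGet?_eq, PySem.Chars.pyGet?_eq_listPyGet?, hs,
        show pre₀ ++ p :: t :: suf' = (pre₀ ++ [p]) ++ t :: suf' by simp,
        show (pre₀.length : Int) + 1 + 1 = (((pre₀ ++ [p]).length : Int) + (1 : Nat)) by simp]
      rw [PySem.List.pyGet?_append_right]
      rfl
    cases suf' with
    | nil =>
      -- last position: A's body reads s[i+1] which is out of range only when t = '&'; here it returns d either way
      have hnil : PySem.List.pyRange ((pre₀.length : Int) + 1 + 1) ((s.toList.length : Nat) : Int) 1 = [] := by
        rw [PySem.List.pyRange_one_eq_nil (by rw [hlen]; simp; omega)]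
      rw [hnil]
      simp only [List.foldl_nil, hget, hnext, hprev]
      show (if t ≠ '&' then d else d) = scanA p [t] d
      split <;> rfl
    | cons c2 suf'' =>
      have hF : (match PySem.Str.pyGet? s ((pre₀.length : Int) + 1) with
          | none => d
          | some t =>
            if t ≠ '&' then
              match PySem.Str.pyGet? s ((pre₀.length : Int) + 1 + 1),
                    PySem.Str.pyGet? s ((pre₀.length : Int) + 1 - 1) with
              | some nxt, some prv =>
                let d := if t = nxt ∧ t = prv then
                    (d.insert (String.ofList ['1', t]) true).insert (String.ofList [t]) true
                  else d
                if t ≠ nxt then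
                  (if t = prv then d.insert (String.ofList ['1', t]) true
                   else d.insert (String.ofList [t]) true)
                else d
              | _, _ => d
            else d) = stepA p t c2 d := by
        rw [hget, hprev, hnext]
        rfl
      rw [hF]
      have hm : (pre₀.length : Int) + 1 + 1 = (((pre₀ ++ [p]).length : Int)) + 1 := by simp
      rw [hm, ih (pre₀ ++ [p]) t (stepA p t c2 d) (by rw [hs]; simp)]
      rfl

-- ===== VERDICT (by name: the statement is the Claim_ definition above) =====
theorem vote2dict_spec : Claim_equal_vote2dict := by
  intro s _
  unfold Spec_vote2dict vote2dict vote2dict_alt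
  show (List.foldl
      (fun d i =>
        match PySem.Str.pyGet? ("&" ++ s ++ "&") i with
        | none => d
        | some t =>
          if t ≠ '&' then
            match PySem.Str.pyGet? ("&" ++ s ++ "&") (i + 1), PySem.Str.pyGet? ("&" ++ s ++ "&") (i - 1) with
            | some nxt, some prv =>
              let d := if t = nxt ∧ t = prv then
                  (d.insert (String.ofList ['1', t]) true).insert (String.ofList [t]) true
                else d
              if t ≠ nxt then
                (if t = prv then d.insert (String.ofList ['1', t]) true
                 else d.insert (String.ofList [t]) true)
              else d
            | _, _ => d
          else d)
      PySem.Dict.empty (PySem.List.pyRange 1 (PySem.Str.len ("&" ++ s ++ "&")) 1)).items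
    = (vote2dictAltGo s.toList PySem.Dict.empty).items
  have hws : ("&" ++ s ++ "&").toList = ([] : List Char) ++ '&' :: (s.toList ++ ['&']) := by simp
  have hstart : PySem.List.pyRange ((([] : List Char).length : Int) + 1)
      ((("&" ++ s ++ "&").toList.length : Nat) : Int) 1
      = PySem.List.pyRange 1 ((("&" ++ s ++ "&").toList.length : Nat) : Int) 1 := by norm_num
  have hlen : PySem.Str.len ("&" ++ s ++ "&") = ((("&" ++ s ++ "&").toList.length : Nat) : Int) := by
    simp
  rw [hlen, ← hstart, foldA ("&" ++ s ++ "&") (s.toList ++ ['&']) [] '&' PySem.Dict.empty hws,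
    scanA_eq_altGo s.toList.length s.toList '&' PySem.Dict.empty le_rfl
      (fun x _ => Classical.em _) (PySem.Dict.nodup_keys_empty)]
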